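-- pv_equiv track=rewrite | github.com/Omisandefunmi/Python-practices | hacker_rank_solutions/cutting_stick.py | cutting_sticks
-- ===== SOURCE A (Python) =====
-- def cutting_sticks(array):
--     result = []
--     array.sort()
--     min_ = array[0]
--     result.append(len(array))
--     for i in range(0, len(array)):
--         if array[i] > min_:
--             min_ = array[i]
--             result.append(len(array) - i)
--     return result
-- ===== SOURCE B (Python) =====
-- def cutting_sticks(array):
--     array.sort()  # same in-place sort as A
--     counts = {}
--     for v in array:
--         counts[v] = counts.get(v, 0) + 1
--     result = []
--     remaining = len(array)
--     for v in counts:  # distinct values, in sorted order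
--         result.append(remaining)
--         remaining -= counts[v]
--     return result
-- ===== Notes on version B (the rewrite author's own statement) =====
-- stated objective: alternative
-- what changed: Instead of scanning the sorted array with a running minimum and index arithmetic to detect group boundaries, B builds a count dictionary of the sorted array and walks its distinct values once, subtracting each group's count from a running remainder.
import Mathlib
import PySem

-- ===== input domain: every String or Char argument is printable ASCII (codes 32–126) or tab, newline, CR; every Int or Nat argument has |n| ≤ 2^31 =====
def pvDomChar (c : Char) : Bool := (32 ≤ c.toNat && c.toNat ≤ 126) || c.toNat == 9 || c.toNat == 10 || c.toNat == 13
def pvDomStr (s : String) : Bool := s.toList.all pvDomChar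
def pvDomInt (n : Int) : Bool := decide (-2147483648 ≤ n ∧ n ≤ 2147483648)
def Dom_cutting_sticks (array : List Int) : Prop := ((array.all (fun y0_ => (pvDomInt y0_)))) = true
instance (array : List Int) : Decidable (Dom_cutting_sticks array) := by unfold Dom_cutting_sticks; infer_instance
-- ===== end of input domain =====

-- B replaces A's boundary scan of the sorted array by a count dictionary walked once with a
-- running remainder (objective: alternative decomposition, same cost). Both A and B sort the
-- argument list in place; the equivalence proved here is about the RETURN value.

-- ===== PORT A =====
def cutting_sticks (array : List Int) : List Int :=
  let arr := PySem.List.sorted array (fun x => x) false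
  match PySem.List.pyGet? arr 0 with
  | none => []  -- Python raises IndexError here (empty list); excluded by Pre_
  | some m =>
      ((PySem.List.pyRange 0 (arr.length : Int) 1).foldl
        (fun (st : Int × List Int) i =>
          if st.1 < PySem.List.pyGetD arr i 0 then
            (PySem.List.pyGetD arr i 0, st.2 ++ [(arr.length : Int) - i])
          else st)
        (m, [(arr.length : Int)])).2

-- ===== PORT B =====
def cutting_sticks_alt (array : List Int) : List Int :=
  let arr := PySem.List.sorted array (fun x => x) false
  let counts := arr.foldl (fun (d : PySem.Dict Int Int) v => d.insert v (d.getD v 0 + 1))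
    PySem.Dict.empty
  (counts.keys.foldl
    (fun (st : List Int × Int) v => (st.1 ++ [st.2], st.2 - counts.getD v 0))
    (([] : List Int), (arr.length : Int))).1

-- ===== PRECONDITION & SPEC =====
-- Pre_ excludes only the empty list, on which A raises IndexError at its first-element access (B returns an empty result there).
def Pre_cutting_sticks (array : List Int) : Prop := array ≠ []
instance (array : List Int) : Decidable (Pre_cutting_sticks array) := by
  unfold Pre_cutting_sticks; infer_instance
def pvWitness_cutting_sticks : List Int := [5, 4, 4, 2, 2, 8]

def Spec_cutting_sticks (array : List Int) (out : List Int) : Prop := out = cutting_sticks_alt array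
instance (array : List Int) (out : List Int) : Decidable (Spec_cutting_sticks array out) := by
  unfold Spec_cutting_sticks; infer_instance

-- ===== CLAIM (what is proved, stated in full; the proofs are below) =====
def Claim_equal_cutting_sticks : Prop := ∀ (array : List Int), Dom_cutting_sticks array →
  Pre_cutting_sticks array → Spec_cutting_sticks array (cutting_sticks array)

-- ===== LEMMAS AND PROOFS =====

-- the sequence of values A appends while scanning positions i, i+1, … with current value `cur`
def pvBounds (n : Int) : Int → Int → List Int → List Int
  | _, _, [] => []
  | cur, i, x :: xs =>
      if cur < x then (n - i) :: pvBounds n x (i + 1) xs else pvBounds n cur (i + 1) xs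

-- the sequence of remainders B appends while walking the distinct values `ds` with counts `c`
def pvParts (c : Int → Int) : Int → List Int → List Int
  | _, [] => []
  | rem, v :: vs => rem :: pvParts c (rem - c v) vs

lemma pvLoopA (n : Int) (t : List Int) : ∀ (i cur : Int) (acc : List Int),
    ((PySem.List.enumerate t i).foldl
      (fun (st : Int × List Int) (p : Int × Int) =>
        if st.1 < p.2 then (p.2, st.2 ++ [n - p.1]) else st) (cur, acc)).2
    = acc ++ pvBounds n cur i t := by
  induction t with
  | nil => intro i cur acc; simp [PySem.List.enumerate, pvBounds]
  | cons x xs ih =>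
      intro i cur acc
      rw [PySem.List.enumerate_cons, List.foldl_cons]
      by_cases h : cur < x
      · simp only [if_pos h, ih, pvBounds, List.append_assoc, List.singleton_append]
      · simp only [ih, pvBounds, if_neg h]

lemma pvLoopB (c : Int → Int) : ∀ (ds acc : List Int) (rem : Int),
    (ds.foldl (fun (st : List Int × Int) v => (st.1 ++ [st.2], st.2 - c v)) (acc, rem)).1
    = acc ++ pvParts c rem ds := by
  intro ds
  induction ds with
  | nil => intro acc rem; simp [pvParts]
  | cons v vs ih =>
      intro acc rem
      rw [List.foldl_cons]
      simp only [ih, pvParts, List.append_assoc, List.singleton_append]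

lemma pvParts_congr (c c' : Int → Int) : ∀ (ds : List Int) (rem : Int),
    (∀ v ∈ ds, c v = c' v) → pvParts c rem ds = pvParts c' rem ds := by
  intro ds
  induction ds with
  | nil => intro rem _; rfl
  | cons v vs ih =>
      intro rem h
      rw [pvParts, pvParts, h v List.mem_cons_self,
        ih _ (fun w hw => h w (List.mem_cons_of_mem _ hw))]

lemma pvOfList_filter (p : Int → Bool) : ∀ (xs : List Int),
    (PySem.Set.ofList xs).filter p = PySem.Set.ofList (xs.filter p) := by
  intro xs
  induction xs with
  | nil => simp [PySem.Set.ofList_nil]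
  | cons x xs ih =>
      rw [PySem.Set.ofList_cons, List.filter_cons]
      by_cases hp : p x = true
      · rw [if_pos hp]
        conv_rhs => rw [List.filter_cons]
        rw [if_pos hp, PySem.Set.ofList_cons, ← ih]
        show x :: List.filter p (List.filter _ _) = x :: List.filter _ (List.filter p _)
        rw [List.filter_filter, List.filter_filter]
        exact congrArg _ (List.filter_congr (fun y _ => Bool.and_comm _ _))
      · rw [if_neg hp]
        conv_rhs => rw [List.filter_cons]
        rw [if_neg hp, ← ih]
        show List.filter p (List.filter _ _) = List.filter p _
        rw [List.filter_filter]
        refine List.filter_congr ?_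
        intro y _
        cases hy : (y == x)
        · simp
        · have hyx : y = x := by simpa using hy
          subst hyx
          simp [Bool.eq_false_iff.mpr (fun h => hp h)]

lemma pvMain (n : Int) (c : Int → Int) : ∀ (t : List Int) (m i : Int),
    t.Pairwise (· ≤ ·) → (∀ y ∈ t, m ≤ y) → n = i + t.length →
    (∀ v ∈ t, m < v → c v = (t.count v : Int)) →
    pvBounds n m i t
      = pvParts c (n - i - (t.count m : Int))
          (PySem.Set.ofList (t.filter (fun y => decide (m < y)))) := by
  intro t
  induction t with
  | nil => intro m i _ _ _ _; simp [pvBounds, pvParts]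
  | cons x xs ih =>
      intro m i hpw hm hn hc
      have hpwx : xs.Pairwise (· ≤ ·) := (List.pairwise_cons.mp hpw).2
      have hxle : ∀ y ∈ xs, x ≤ y := (List.pairwise_cons.mp hpw).1
      by_cases h : m < x
      · -- boundary: x starts a new group
        have hxnem : ∀ y ∈ x :: xs, m < y := by
          intro y hy
          rcases List.mem_cons.mp hy with rfl | hy
          · exact h
          · exact lt_of_lt_of_le h (hxle y hy)
        have hcm : (x :: xs).count m = 0 := by
          rw [List.count_eq_zero]
          intro hmem
          exact absurd rfl (ne_of_gt (hxnem m hmem)).symm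
        have hfilter : (x :: xs).filter (fun y => decide (m < y)) = x :: xs := by
          rw [List.filter_eq_self]
          intro y hy; simpa using hxnem y hy
        rw [hfilter, PySem.Set.ofList_cons]
        have hdisc : PySem.Set.discard (PySem.Set.ofList xs) x
            = PySem.Set.ofList (xs.filter (fun y => decide (x < y))) := by
          show (PySem.Set.ofList xs).filter _ = _
          rw [pvOfList_filter]
          refine congrArg _ (List.filter_congr ?_)
          intro y hy
          have hxy : x ≤ y := hxle y hy
          cases hyx : (y == x)
          · have hne : y ≠ x := by simpa using hyx
            simp [lt_of_le_of_ne hxy (Ne.symm hne)]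
          · have heq : y = x := by simpa using hyx
            subst heq; simp
        rw [hdisc]
        have hcx : c x = ((x :: xs).count x : Int) := hc x List.mem_cons_self h
        have hihm : ∀ v ∈ xs, x < v → c v = (xs.count v : Int) := by
          intro v hv hxv
          have hcv : c v = ((x :: xs).count v : Int) :=
            hc v (List.mem_cons_of_mem _ hv) (lt_trans h hxv)
          rwa [List.count_cons_of_ne (ne_of_lt hxv)] at hcv
        have hrec := ih x (i + 1) hpwx hxle (by simp only [List.length_cons] at hn; push_cast at hn ⊢; omega) hihm
        rw [pvBounds, if_pos h, pvParts, hcm]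
        rw [hrec, hcx, List.count_cons_self]
        have e1 : n - i - (((0 : Nat) : Int)) = n - i := by push_cast; ring
        have e2 : n - i - ((List.count x xs + 1 : Nat) : Int)
            = n - (i + 1) - ((List.count x xs : Nat) : Int) := by push_cast; ring
        rw [e1, e2]
      · -- x = m: one more copy of the current group, no output
        have hxm : x = m := le_antisymm (by simpa [not_lt] using h) (hm x List.mem_cons_self)
        subst hxm
        have hih := ih x (i + 1) hpwx hxle (by simp only [List.length_cons] at hn; push_cast at hn ⊢; omega)
          (fun v hv hxv => by
            have hcv : c v = ((x :: xs).count v : Int) :=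
              hc v (List.mem_cons_of_mem _ hv) hxv
            rwa [List.count_cons_of_ne (ne_of_lt hxv)] at hcv)
        rw [pvBounds, if_neg h, hih]
        rw [show (x :: xs).filter (fun y => decide (x < y)) = xs.filter (fun y => decide (x < y))
          from by rw [List.filter_cons]; simp]
        rw [List.count_cons_self]
        congr 1
        push_cast
        ring

-- ===== VERDICT (by name: the statement is the Claim_ definition above) =====
theorem cutting_sticks_spec : Claim_equal_cutting_sticks := by
  intro array _ hpre
  show cutting_sticks array = cutting_sticks_alt array
  have hne : PySem.List.sorted array (fun x => x) false ≠ [] := by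
    rw [Ne, PySem.List.sorted_eq_nil_iff]; exact hpre
  obtain ⟨m, t, harr⟩ := List.exists_cons_of_ne_nil hne
  have hpw : List.Pairwise (fun a b : Int => a ≤ b) (m :: t) := by
    have h := PySem.List.sorted_pairwise array (fun x : Int => x)
    rwa [harr] at h
  have hm : ∀ y ∈ t, m ≤ y := (List.pairwise_cons.mp hpw).1
  -- A's side: the scan produces the length followed by the boundary values
  have hA : cutting_sticks array
      = ((m :: t).length : Int) :: pvBounds ((m :: t).length : Int) m 1 t := by
    simp only [cutting_sticks]
    rw [harr]
    simp only [show PySem.List.pyGet? (m :: t) (0 : Int) = some m from by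
      simp [PySem.List.pyGet?, PySem.List.pyIdx?]]
    have hfold : (PySem.List.pyRange 0 ((m :: t).length : Int) 1).foldl
        (fun (st : Int × List Int) i =>
          if st.1 < PySem.List.pyGetD (m :: t) i 0 then
            (PySem.List.pyGetD (m :: t) i 0, st.2 ++ [((m :: t).length : Int) - i])
          else st)
        (m, [((m :: t).length : Int)])
        = (PySem.List.enumerate (m :: t) 0).foldl
            (fun (st : Int × List Int) (p : Int × Int) =>
              if st.1 < p.2 then (p.2, st.2 ++ [((m :: t).length : Int) - p.1]) else st)
            (m, [((m :: t).length : Int)]) := by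
      rw [PySem.List.enumerate_eq_map_pyRange (d := 0), List.foldl_map]
      rfl
    rw [hfold, PySem.List.enumerate_cons, List.foldl_cons, if_neg (lt_irrefl m), zero_add]
    rw [pvLoopA ((m :: t).length : Int) t 1 m [((m :: t).length : Int)]]
    rfl
  -- B's side: the count-dictionary walk produces the partial remainders
  have hB : cutting_sticks_alt array
      = pvParts (fun v => ((m :: t).count v : Int)) ((m :: t).length : Int)
          (PySem.Set.ofList (m :: t)) := by
    simp only [cutting_sticks_alt]
    rw [harr]
    rw [PySem.Dict.foldl_insert_getD_add_one_eq_counter]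
    have hloop := pvLoopB (fun v => (PySem.Dict.counter (m :: t)).getD v 0)
      ((PySem.Dict.counter (m :: t)).keys) [] ((m :: t).length : Int)
    refine Eq.trans hloop ?_
    rw [List.nil_append, PySem.Dict.keys_counter]
    exact pvParts_congr _ _ _ _ (fun v _ => PySem.Dict.getD_counter (m :: t) v)
  rw [hA, hB]
  -- unfold B's first step: the head group is m itself
  rw [PySem.Set.ofList_cons]
  have hdisc : PySem.Set.discard (PySem.Set.ofList t) m
      = PySem.Set.ofList (t.filter (fun y => decide (m < y))) := by
    show (PySem.Set.ofList t).filter _ = _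
    rw [pvOfList_filter]
    refine congrArg _ (List.filter_congr ?_)
    intro y hy
    have hmy : m ≤ y := hm y hy
    cases hym : (y == m)
    · have hne : y ≠ m := by simpa using hym
      simp [lt_of_le_of_ne hmy (Ne.symm hne)]
    · have heq : y = m := by simpa using hym
      subst heq; simp
  rw [hdisc, pvParts]
  have hmain := pvMain ((m :: t).length : Int) (fun v => ((m :: t).count v : Int)) t m 1
    (List.pairwise_cons.mp hpw).2 hm (by simp; ring)
    (fun v hv hmv => by
      show (((m :: t).count v : Nat) : Int) = (t.count v : Int)
      rw [List.count_cons_of_ne (ne_of_lt hmv)])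
  rw [hmain]
  have e3 : ((m :: t).length : Int) - (((m :: t).count m : Nat) : Int)
      = ((m :: t).length : Int) - 1 - ((t.count m : Nat) : Int) := by
    rw [List.count_cons_self]; push_cast; ring
  rw [e3]
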